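-- pv_equiv track=rewrite | github.com/pypi-data/pypi-mirror-399 | packages/pdf-craft/pdf_craft-1.0.7-py3-none-any.whl/pdf_craft/markdown/paragraph/tags.py | is_protocol_allowed
-- ===== SOURCE A (Python) =====
-- ALLOWED_PROTOCOLS = frozenset([
--     "http",
--     "https",
--     "mailto",
--     # Relative URLs are also allowed (no protocol)
-- ])
--
-- def is_protocol_allowed(url: str) -> bool:
--     if not url:
--         return True
--
--     # Relative URLs are allowed
--     if url.startswith("/") or url.startswith("./") or url.startswith("../"):
--         return True
--
--     # Check against allowed protocols
--     url_lower = url.lower()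
--     for protocol in ALLOWED_PROTOCOLS:
--         if url_lower.startswith(f"{protocol}:"):
--             return True
--
--     return False
-- ===== SOURCE B (Python) =====
-- # Allowed protocols recognised by a precomputed character-level DFA
-- # (states = matched prefixes, built once at module load); relative URLs allowed.
-- _WORDS = ("http", "https", "mailto")
-- _TERMINAL = frozenset(_WORDS)
-- _NEXT = {}
-- for _w in _WORDS:
--     for _i, _c in enumerate(_w):
--         _NEXT[(_w[:_i], _c)] = _w[:_i] + _c
--
--
-- def is_protocol_allowed(url: str) -> bool:
--     if not url:
--         return True
--     if url.startswith("/") or url.startswith("./") or url.startswith("../"):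
--         return True
--     state = ""
--     for ch in url:
--         c = ch.lower()
--         if c == ":":
--             return state in _TERMINAL
--         state = _NEXT.get((state, c))
--         if state is None:
--             return False
--     return False
-- ===== Notes on version B (the rewrite author's own statement) =====
-- stated objective: alternative
-- what changed: Replaces the loop of startswith prefix tests over ALLOWED_PROTOCOLS by a single character-by-character pass driving a precomputed trie/DFA transition table, lowercasing per character and deciding on the first colon or first mismatch.
import Mathlib
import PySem

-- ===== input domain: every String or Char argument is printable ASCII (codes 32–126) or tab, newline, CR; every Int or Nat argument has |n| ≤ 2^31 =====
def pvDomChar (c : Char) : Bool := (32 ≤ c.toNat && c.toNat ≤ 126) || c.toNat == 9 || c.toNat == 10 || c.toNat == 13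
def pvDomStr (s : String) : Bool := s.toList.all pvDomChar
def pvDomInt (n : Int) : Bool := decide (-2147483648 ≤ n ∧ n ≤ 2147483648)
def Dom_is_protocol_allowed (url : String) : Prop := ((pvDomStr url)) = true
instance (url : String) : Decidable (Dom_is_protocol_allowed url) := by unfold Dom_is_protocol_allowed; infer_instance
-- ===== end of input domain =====

-- B replaces A's loop of startswith prefix tests over the allowed protocols by a single
-- character-by-character pass driving a precomputed trie/DFA transition table (alternative).

set_option maxRecDepth 10000


-- ===== PORT A =====
def is_protocol_allowed (url : String) : Bool :=
  if url == "" then true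
  else if PySem.Str.startswith url "/" || PySem.Str.startswith url "./"
          || PySem.Str.startswith url "../" then true
  else
    let url_lower := PySem.Str.lower url
    -- the for-loop over ALLOWED_PROTOCOLS, unrolled over its three elements
    if PySem.Str.startswith url_lower "http:" then true
    else if PySem.Str.startswith url_lower "https:" then true
    else if PySem.Str.startswith url_lower "mailto:" then true
    else false

-- ===== PORT B =====
-- module-level precomputed data of Source B, written out as literals:
-- _TERMINAL = {"http","https","mailto"}
def pvTerminal (s : List Char) : Bool :=
  s == "http".toList || s == "https".toList || s == "mailto".toList

-- _NEXT, the trie/DFA transition table built from the three words (11 distinct entries;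
-- states are the matched prefixes)
def pvTable : PySem.Dict (List Char × Char) (List Char) := PySem.Dict.mk [
  (([], 'h'), ['h']),
  ((['h'], 't'), ['h','t']),
  ((['h','t'], 't'), ['h','t','t']),
  ((['h','t','t'], 'p'), ['h','t','t','p']),
  ((['h','t','t','p'], 's'), ['h','t','t','p','s']),
  (([], 'm'), ['m']),
  ((['m'], 'a'), ['m','a']),
  ((['m','a'], 'i'), ['m','a','i']),
  ((['m','a','i'], 'l'), ['m','a','i','l']),
  ((['m','a','i','l'], 't'), ['m','a','i','l','t']),
  ((['m','a','i','l','t'], 'o'), ['m','a','i','l','t','o'])]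

-- the for-loop of Source B: per-character lower, stop at ':' (terminal test) or on a
-- missing transition
def pvWalk (state : List Char) (l : List Char) : Bool :=
  match l with
  | [] => false
  | ch :: rest =>
    let c := PySem.Chars.lowerChar ch
    if c = ':' then pvTerminal state
    else
      match pvTable.get? (state, c) with
      | none => false
      | some s' => pvWalk s' rest

def is_protocol_allowed_alt (url : String) : Bool :=
  if url == "" then true
  else if PySem.Str.startswith url "/" || PySem.Str.startswith url "./"
          || PySem.Str.startswith url "../" then true
  else pvWalk [] url.toList

-- ===== PRECONDITION & SPEC =====
def Spec_is_protocol_allowed (url : String) (out : Bool) : Prop := out = is_protocol_allowed_alt url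
instance (url : String) (out : Bool) : Decidable (Spec_is_protocol_allowed url out) := by unfold Spec_is_protocol_allowed; infer_instance

-- ===== CLAIM =====
def Claim_equal_is_protocol_allowed : Prop := ∀ (url : String), Dom_is_protocol_allowed url → Spec_is_protocol_allowed url (is_protocol_allowed url)

-- ===== LEMMAS AND PROOFS =====

-- The transition table, evaluated per state for a symbolic character.
theorem get_root (c : Char) :
    pvTable.get? (([] : List Char), c)
      = if c = 'h' then some ['h'] else if c = 'm' then some ['m'] else none := by
  by_cases h1 : c = 'h' <;> by_cases h2 : c = 'm' <;> simp_all [pvTable, PySem.Dict.get?] <;>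
    exact ⟨fun e => h1 e.symm, fun e => h2 e.symm⟩

theorem get_h (c : Char) :
    pvTable.get? (['h'], c) = if c = 't' then some ['h','t'] else none := by
  by_cases h1 : c = 't' <;> simp_all [pvTable, PySem.Dict.get?] <;> exact fun e => h1 e.symm

theorem get_ht (c : Char) :
    pvTable.get? (['h','t'], c) = if c = 't' then some ['h','t','t'] else none := by
  by_cases h1 : c = 't' <;> simp_all [pvTable, PySem.Dict.get?] <;> exact fun e => h1 e.symm

theorem get_htt (c : Char) :
    pvTable.get? (['h','t','t'], c) = if c = 'p' then some ['h','t','t','p'] else none := by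
  by_cases h1 : c = 'p' <;> simp_all [pvTable, PySem.Dict.get?] <;> exact fun e => h1 e.symm

theorem get_http (c : Char) :
    pvTable.get? (['h','t','t','p'], c) = if c = 's' then some ['h','t','t','p','s'] else none := by
  by_cases h1 : c = 's' <;> simp_all [pvTable, PySem.Dict.get?] <;> exact fun e => h1 e.symm

theorem get_https (c : Char) : pvTable.get? (['h','t','t','p','s'], c) = none := by
  simp [pvTable, PySem.Dict.get?]

theorem get_m (c : Char) :
    pvTable.get? (['m'], c) = if c = 'a' then some ['m','a'] else none := by
  by_cases h1 : c = 'a' <;> simp_all [pvTable, PySem.Dict.get?] <;> exact fun e => h1 e.symm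

theorem get_ma (c : Char) :
    pvTable.get? (['m','a'], c) = if c = 'i' then some ['m','a','i'] else none := by
  by_cases h1 : c = 'i' <;> simp_all [pvTable, PySem.Dict.get?] <;> exact fun e => h1 e.symm

theorem get_mai (c : Char) :
    pvTable.get? (['m','a','i'], c) = if c = 'l' then some ['m','a','i','l'] else none := by
  by_cases h1 : c = 'l' <;> simp_all [pvTable, PySem.Dict.get?] <;> exact fun e => h1 e.symm

theorem get_mail (c : Char) :
    pvTable.get? (['m','a','i','l'], c) = if c = 't' then some ['m','a','i','l','t'] else none := by
  by_cases h1 : c = 't' <;> simp_all [pvTable, PySem.Dict.get?] <;> exact fun e => h1 e.symm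

theorem get_mailt (c : Char) :
    pvTable.get? (['m','a','i','l','t'], c) = if c = 'o' then some ['m','a','i','l','t','o'] else none := by
  by_cases h1 : c = 'o' <;> simp_all [pvTable, PySem.Dict.get?] <;> exact fun e => h1 e.symm

theorem get_mailto (c : Char) : pvTable.get? (['m','a','i','l','t','o'], c) = none := by
  simp [pvTable, PySem.Dict.get?]

-- From each DFA state, the walk recognises exactly "remaining suffix + ':'"
-- (on the per-character-lowered input).  One lemma per state, deepest first.
theorem walk_mailto (l : List Char) :
    pvWalk ['m','a','i','l','t','o'] l = PySem.Chars.startswith (PySem.Chars.lower l) [':'] := by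
  cases l with
  | nil => rfl
  | cons c t =>
    by_cases h : PySem.Chars.lowerChar c = ':'
    · simp [pvWalk, h, PySem.Chars.lower, PySem.Chars.startswith, List.isPrefixOf, pvTerminal]
    · simp [pvWalk, h, Ne.symm h, get_mailto, PySem.Chars.lower, PySem.Chars.startswith,
        List.isPrefixOf]

theorem walk_https (l : List Char) :
    pvWalk ['h','t','t','p','s'] l = PySem.Chars.startswith (PySem.Chars.lower l) [':'] := by
  cases l with
  | nil => rfl
  | cons c t =>
    by_cases h : PySem.Chars.lowerChar c = ':'
    · simp [pvWalk, h, PySem.Chars.lower, PySem.Chars.startswith, List.isPrefixOf, pvTerminal]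
    · simp [pvWalk, h, Ne.symm h, get_https, PySem.Chars.lower, PySem.Chars.startswith,
        List.isPrefixOf]

theorem walk_mailt (l : List Char) :
    pvWalk ['m','a','i','l','t'] l = PySem.Chars.startswith (PySem.Chars.lower l) ['o',':'] := by
  cases l with
  | nil => rfl
  | cons c t =>
    by_cases h : PySem.Chars.lowerChar c = ':'
    · simp [pvWalk, h, PySem.Chars.lower, PySem.Chars.startswith, List.isPrefixOf, pvTerminal]
    · by_cases ho : PySem.Chars.lowerChar c = 'o'
      · simp [pvWalk, h, Ne.symm h, ho, get_mailt, walk_mailto, PySem.Chars.lower,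
          PySem.Chars.startswith, List.isPrefixOf]
      · simp [pvWalk, h, Ne.symm h, ho, Ne.symm ho, get_mailt, PySem.Chars.lower,
          PySem.Chars.startswith, List.isPrefixOf]

theorem walk_mail (l : List Char) :
    pvWalk ['m','a','i','l'] l = PySem.Chars.startswith (PySem.Chars.lower l) ['t','o',':'] := by
  cases l with
  | nil => rfl
  | cons c t =>
    by_cases h : PySem.Chars.lowerChar c = ':'
    · simp [pvWalk, h, PySem.Chars.lower, PySem.Chars.startswith, List.isPrefixOf, pvTerminal]
    · by_cases ho : PySem.Chars.lowerChar c = 't'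
      · simp [pvWalk, h, Ne.symm h, ho, get_mail, walk_mailt, PySem.Chars.lower,
          PySem.Chars.startswith, List.isPrefixOf]
      · simp [pvWalk, h, Ne.symm h, ho, Ne.symm ho, get_mail, PySem.Chars.lower,
          PySem.Chars.startswith, List.isPrefixOf]

theorem walk_mai (l : List Char) :
    pvWalk ['m','a','i'] l = PySem.Chars.startswith (PySem.Chars.lower l) ['l','t','o',':'] := by
  cases l with
  | nil => rfl
  | cons c t =>
    by_cases h : PySem.Chars.lowerChar c = ':'
    · simp [pvWalk, h, PySem.Chars.lower, PySem.Chars.startswith, List.isPrefixOf, pvTerminal]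
    · by_cases ho : PySem.Chars.lowerChar c = 'l'
      · simp [pvWalk, h, Ne.symm h, ho, get_mai, walk_mail, PySem.Chars.lower,
          PySem.Chars.startswith, List.isPrefixOf]
      · simp [pvWalk, h, Ne.symm h, ho, Ne.symm ho, get_mai, PySem.Chars.lower,
          PySem.Chars.startswith, List.isPrefixOf]

theorem walk_ma (l : List Char) :
    pvWalk ['m','a'] l = PySem.Chars.startswith (PySem.Chars.lower l) ['i','l','t','o',':'] := by
  cases l with
  | nil => rfl
  | cons c t =>
    by_cases h : PySem.Chars.lowerChar c = ':'
    · simp [pvWalk, h, PySem.Chars.lower, PySem.Chars.startswith, List.isPrefixOf, pvTerminal]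
    · by_cases ho : PySem.Chars.lowerChar c = 'i'
      · simp [pvWalk, h, Ne.symm h, ho, get_ma, walk_mai, PySem.Chars.lower,
          PySem.Chars.startswith, List.isPrefixOf]
      · simp [pvWalk, h, Ne.symm h, ho, Ne.symm ho, get_ma, PySem.Chars.lower,
          PySem.Chars.startswith, List.isPrefixOf]

theorem walk_m (l : List Char) :
    pvWalk ['m'] l = PySem.Chars.startswith (PySem.Chars.lower l) ['a','i','l','t','o',':'] := by
  cases l with
  | nil => rfl
  | cons c t =>
    by_cases h : PySem.Chars.lowerChar c = ':'
    · simp [pvWalk, h, PySem.Chars.lower, PySem.Chars.startswith, List.isPrefixOf, pvTerminal]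
    · by_cases ho : PySem.Chars.lowerChar c = 'a'
      · simp [pvWalk, h, Ne.symm h, ho, get_m, walk_ma, PySem.Chars.lower,
          PySem.Chars.startswith, List.isPrefixOf]
      · simp [pvWalk, h, Ne.symm h, ho, Ne.symm ho, get_m, PySem.Chars.lower,
          PySem.Chars.startswith, List.isPrefixOf]

-- "http" is terminal AND has an outgoing edge: two recognised continuations
theorem walk_http (l : List Char) :
    pvWalk ['h','t','t','p'] l
      = (PySem.Chars.startswith (PySem.Chars.lower l) [':']
         || PySem.Chars.startswith (PySem.Chars.lower l) ['s',':']) := by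
  cases l with
  | nil => rfl
  | cons c t =>
    by_cases h : PySem.Chars.lowerChar c = ':'
    · simp [pvWalk, h, PySem.Chars.lower, PySem.Chars.startswith, List.isPrefixOf, pvTerminal]
    · by_cases ho : PySem.Chars.lowerChar c = 's'
      · simp [pvWalk, h, Ne.symm h, ho, get_http, walk_https, PySem.Chars.lower,
          PySem.Chars.startswith, List.isPrefixOf]
      · simp [pvWalk, h, Ne.symm h, ho, Ne.symm ho, get_http, PySem.Chars.lower,
          PySem.Chars.startswith, List.isPrefixOf]

theorem walk_htt (l : List Char) :
    pvWalk ['h','t','t'] l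
      = (PySem.Chars.startswith (PySem.Chars.lower l) ['p',':']
         || PySem.Chars.startswith (PySem.Chars.lower l) ['p','s',':']) := by
  cases l with
  | nil => rfl
  | cons c t =>
    by_cases h : PySem.Chars.lowerChar c = ':'
    · simp [pvWalk, h, PySem.Chars.lower, PySem.Chars.startswith, List.isPrefixOf, pvTerminal]
    · by_cases ho : PySem.Chars.lowerChar c = 'p'
      · simp [pvWalk, h, Ne.symm h, ho, get_htt, walk_http, PySem.Chars.lower,
          PySem.Chars.startswith, List.isPrefixOf]
      · simp [pvWalk, h, Ne.symm h, ho, Ne.symm ho, get_htt, PySem.Chars.lower,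
          PySem.Chars.startswith, List.isPrefixOf]

theorem walk_ht (l : List Char) :
    pvWalk ['h','t'] l
      = (PySem.Chars.startswith (PySem.Chars.lower l) ['t','p',':']
         || PySem.Chars.startswith (PySem.Chars.lower l) ['t','p','s',':']) := by
  cases l with
  | nil => rfl
  | cons c t =>
    by_cases h : PySem.Chars.lowerChar c = ':'
    · simp [pvWalk, h, PySem.Chars.lower, PySem.Chars.startswith, List.isPrefixOf, pvTerminal]
    · by_cases ho : PySem.Chars.lowerChar c = 't'
      · simp [pvWalk, h, Ne.symm h, ho, get_ht, walk_htt, PySem.Chars.lower,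
          PySem.Chars.startswith, List.isPrefixOf]
      · simp [pvWalk, h, Ne.symm h, ho, Ne.symm ho, get_ht, PySem.Chars.lower,
          PySem.Chars.startswith, List.isPrefixOf]

theorem walk_h (l : List Char) :
    pvWalk ['h'] l
      = (PySem.Chars.startswith (PySem.Chars.lower l) ['t','t','p',':']
         || PySem.Chars.startswith (PySem.Chars.lower l) ['t','t','p','s',':']) := by
  cases l with
  | nil => rfl
  | cons c t =>
    by_cases h : PySem.Chars.lowerChar c = ':'
    · simp [pvWalk, h, PySem.Chars.lower, PySem.Chars.startswith, List.isPrefixOf, pvTerminal]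
    · by_cases ho : PySem.Chars.lowerChar c = 't'
      · simp [pvWalk, h, Ne.symm h, ho, get_h, walk_ht, PySem.Chars.lower,
          PySem.Chars.startswith, List.isPrefixOf]
      · simp [pvWalk, h, Ne.symm h, ho, Ne.symm ho, get_h, PySem.Chars.lower,
          PySem.Chars.startswith, List.isPrefixOf]

theorem walk_root (l : List Char) :
    pvWalk [] l
      = (PySem.Chars.startswith (PySem.Chars.lower l) "http:".toList
         || PySem.Chars.startswith (PySem.Chars.lower l) "https:".toList
         || PySem.Chars.startswith (PySem.Chars.lower l) "mailto:".toList) := by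
  cases l with
  | nil => rfl
  | cons c t =>
    by_cases h : PySem.Chars.lowerChar c = ':'
    · simp [pvWalk, h, PySem.Chars.lower, PySem.Chars.startswith, List.isPrefixOf, pvTerminal]
    · by_cases hh : PySem.Chars.lowerChar c = 'h'
      · simp [pvWalk, h, Ne.symm h, hh, get_root, walk_h, PySem.Chars.lower,
          PySem.Chars.startswith, List.isPrefixOf]
      · by_cases hm : PySem.Chars.lowerChar c = 'm'
        · simp [pvWalk, h, Ne.symm h, hh, Ne.symm hh, hm, get_root, walk_m, PySem.Chars.lower,
            PySem.Chars.startswith, List.isPrefixOf]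
        · simp [pvWalk, h, Ne.symm h, hh, Ne.symm hh, hm, Ne.symm hm, get_root,
            PySem.Chars.lower, PySem.Chars.startswith, List.isPrefixOf]

-- ===== VERDICT =====
theorem is_protocol_allowed_spec : Claim_equal_is_protocol_allowed := by
  intro url _
  unfold Spec_is_protocol_allowed is_protocol_allowed is_protocol_allowed_alt
  by_cases h0 : url == ""
  · simp [h0]
  · simp only [h0, Bool.false_eq_true, if_false]
    by_cases h1 : (PySem.Str.startswith url "/" || PySem.Str.startswith url "./"
          || PySem.Str.startswith url "../") = true
    · simp only [h1, if_true]
    · simp only [h1, Bool.false_eq_true, if_false, walk_root,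
        PySem.Str.startswith, PySem.Str.toList_lower]
      cases hb : PySem.Chars.startswith (PySem.Chars.lower url.toList) "http:".toList <;>
      cases hb2 : PySem.Chars.startswith (PySem.Chars.lower url.toList) "https:".toList <;>
      cases hb3 : PySem.Chars.startswith (PySem.Chars.lower url.toList) "mailto:".toList <;>
      simp [hb, hb2, hb3]
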